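-- pv_equiv track=rewrite | github.com/DevilCoders/Yandex | cloud/analytics/ml/scoring/churn_model/run_model.py | get_days_arr
-- ===== SOURCE A (Python) =====
-- import typing as tp
--
-- def get_days_arr(curr_visits_arr: tp.List[int], active_type: int = 1) -> tp.List[int]:
--     curr_visits = 0
--     ans_arr = []
--     for elem in curr_visits_arr:
--         if elem == 1 - active_type:
--             if curr_visits > 0:
--                 ans_arr.append(curr_visits)
--             curr_visits = 0
--         else:
--             curr_visits += 1
--     ans_arr.append(curr_visits)
--     return ans_arr
-- ===== SOURCE B (Python) =====
-- import typing as tp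
--
-- def get_days_arr(curr_visits_arr: tp.List[int], active_type: int = 1) -> tp.List[int]:
--     brk = 1 - active_type
--     n = len(curr_visits_arr)
--     cuts = [i for i, x in enumerate(curr_visits_arr) if x == brk]
--     bounds = [-1] + cuts + [n]
--     gaps = [b - a - 1 for a, b in zip(bounds, bounds[1:])]
--     return [g for g in gaps[:-1] if g > 0] + [gaps[-1]]
-- ===== Notes on version B (the rewrite author's own statement) =====
-- stated objective: alternative
-- what changed: B computes the index positions of the break value (1 - active_type), brackets them with -1 and len, and derives each run length arithmetically as the gap between adjacent break positions (difference minus one), instead of A's element-by-element counter-with-flush scan.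
import Mathlib
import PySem

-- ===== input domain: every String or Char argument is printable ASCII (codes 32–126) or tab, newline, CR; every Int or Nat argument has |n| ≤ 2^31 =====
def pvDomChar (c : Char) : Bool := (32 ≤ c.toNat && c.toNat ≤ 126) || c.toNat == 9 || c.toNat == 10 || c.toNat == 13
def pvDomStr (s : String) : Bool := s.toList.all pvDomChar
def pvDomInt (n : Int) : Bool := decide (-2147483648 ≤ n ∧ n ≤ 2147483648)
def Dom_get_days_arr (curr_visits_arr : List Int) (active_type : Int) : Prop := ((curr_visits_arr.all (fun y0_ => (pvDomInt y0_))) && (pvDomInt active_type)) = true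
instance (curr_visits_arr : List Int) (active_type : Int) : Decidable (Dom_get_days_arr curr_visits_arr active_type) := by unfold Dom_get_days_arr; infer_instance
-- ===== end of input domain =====

-- B derives run lengths arithmetically from the break-value index positions instead of A's counter-with-flush scan (objective: alternative).

-- ===== PORT A =====
-- state: (curr_visits, ans_arr); one step of A's loop body
def get_days_arr (curr_visits_arr : List Int) (active_type : Int) : List Int :=
  let fin := curr_visits_arr.foldl
    (fun (st : Int × List Int) elem =>
      if elem = 1 - active_type then
        (0, if st.1 > 0 then st.2 ++ [st.1] else st.2)
      else
        (st.1 + 1, st.2))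
    (0, [])
  fin.2 ++ [fin.1]

-- ===== PORT B =====
-- gaps = [b - a - 1 for a, b in zip(bounds, bounds[1:])]
def bGaps (bounds : List Int) : List Int :=
  (bounds.zip bounds.tail).map (fun p => p.2 - p.1 - 1)

def get_days_arr_alt (curr_visits_arr : List Int) (active_type : Int) : List Int :=
  let brk := 1 - active_type
  let n : Int := curr_visits_arr.length
  let cuts := ((PySem.List.enumerate curr_visits_arr).filter (fun p => p.2 = brk)).map (fun p => p.1)
  let bounds := -1 :: (cuts ++ [n])
  let gaps := bGaps bounds
  (gaps.dropLast.filter (fun g => 0 < g)) ++ [gaps.getLastD 0]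

-- ===== PRECONDITION & SPEC =====
def Spec_get_days_arr (curr_visits_arr : List Int) (active_type : Int) (out : List Int) : Prop := out = get_days_arr_alt curr_visits_arr active_type
instance (curr_visits_arr : List Int) (active_type : Int) (out : List Int) : Decidable (Spec_get_days_arr curr_visits_arr active_type out) := by unfold Spec_get_days_arr; infer_instance

-- ===== CLAIM =====
def Claim_equal_get_days_arr : Prop := ∀ (curr_visits_arr : List Int) (active_type : Int), Dom_get_days_arr curr_visits_arr active_type → Spec_get_days_arr curr_visits_arr active_type (get_days_arr curr_visits_arr active_type)

-- ===== LEMMAS AND PROOFS =====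

-- reference function: the run lengths of l continuing a current run of length cv
def refRuns (brk cv : Int) : List Int → List Int
  | [] => [cv]
  | x :: xs => if x = brk then (if cv > 0 then cv :: refRuns brk 0 xs else refRuns brk 0 xs)
               else refRuns brk (cv + 1) xs

theorem aFold_eq_ref (brk : Int) (l : List Int) : ∀ (cv : Int) (ans : List Int),
    (let fin := l.foldl
      (fun (st : Int × List Int) elem =>
        if elem = brk then (0, if st.1 > 0 then st.2 ++ [st.1] else st.2)
        else (st.1 + 1, st.2)) (cv, ans)
     fin.2 ++ [fin.1]) = ans ++ refRuns brk cv l := by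
  induction l with
  | nil => intro cv ans; simp [refRuns]
  | cons x xs ih =>
    intro cv ans
    simp only [List.foldl_cons, refRuns]
    split_ifs with h1 h2 <;> simp_all

-- cut positions of brk in l, indexing from i
def cutsF (brk i : Int) : List Int → List Int
  | [] => []
  | x :: xs => if x = brk then i :: cutsF brk (i + 1) xs else cutsF brk (i + 1) xs

theorem enum_cuts (brk : Int) (l : List Int) : ∀ (i : Int),
    ((PySem.List.enumerate l i).filter (fun p => p.2 = brk)).map (fun p => p.1)
      = cutsF brk i l := by
  induction l with
  | nil => intro i; simp [PySem.List.enumerate_nil, cutsF]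
  | cons x xs ih =>
    intro i
    simp only [PySem.List.enumerate_cons, List.filter_cons, cutsF]
    by_cases hx : x = brk <;> simp [hx, ih]

-- the tail of B's output computation
def outOf (bs : List Int) : List Int :=
  let gaps := bGaps bs
  (gaps.dropLast.filter (fun g => 0 < g)) ++ [gaps.getLastD 0]

theorem bGaps_cons (a b : Int) (rest : List Int) :
    bGaps (a :: b :: rest) = (b - a - 1) :: bGaps (b :: rest) := by
  simp [bGaps]

theorem bGaps_ne_nil (a b : Int) (rest : List Int) : bGaps (a :: b :: rest) ≠ [] := by
  cases rest <;> simp [bGaps]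

theorem outOf_cons (a b : Int) (rest : List Int) (h : rest ≠ []) :
    outOf (a :: b :: rest)
      = (if 0 < b - a - 1 then [b - a - 1] else []) ++ outOf (b :: rest) := by
  rcases List.exists_cons_of_ne_nil h with ⟨c, rest', rfl⟩
  unfold outOf
  rw [bGaps_cons]
  have h2 := bGaps_ne_nil b c rest'
  rcases List.exists_cons_of_ne_nil h2 with ⟨g, gs, hg⟩
  rw [hg]
  simp [List.filter_cons]
  split_ifs <;> simp

theorem outOf_ref (brk : Int) (l : List Int) : ∀ (i prev : Int),
    outOf (prev :: (cutsF brk i l ++ [i + l.length])) = refRuns brk (i - prev - 1) l := by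
  induction l with
  | nil =>
    intro i prev
    simp [outOf, cutsF, bGaps, refRuns]
  | cons x xs ih =>
    intro i prev
    simp only [cutsF, refRuns, List.length_cons]
    push_cast
    by_cases hx : x = brk
    · simp only [hx, if_true]
      have hsh : ((i :: cutsF brk (i + 1) xs) ++ [i + (↑xs.length + 1)])
          = i :: (cutsF brk (i + 1) xs ++ [(i + 1) + ↑xs.length]) := by
        simp only [List.cons_append, List.cons.injEq, true_and]
        congr 2
        ring
      rw [hsh, outOf_cons prev i _ (by simp), ih (i + 1) i]
      have : (i + 1) - i - 1 = 0 := by ring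
      rw [this]
      split_ifs <;> simp
    · simp only [hx, if_false]
      have : (i + (↑xs.length + 1)) = (i + 1) + ↑xs.length := by ring
      rw [this, ih (i + 1) prev]
      congr 1
      ring

-- ===== VERDICT =====
theorem get_days_arr_spec : Claim_equal_get_days_arr := by
  intro arr at_ _
  unfold Spec_get_days_arr get_days_arr get_days_arr_alt
  rw [aFold_eq_ref (1 - at_) arr 0 []]
  show refRuns (1 - at_) 0 arr = outOf (-1 :: _)
  rw [enum_cuts]
  rw [show (arr.length : Int) = 0 + arr.length from by ring]
  rw [outOf_ref]
  norm_num
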